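-- pv_equiv track=rewrite | github.com/yawar2-ux/rag_doc_API-testing03_ip | TransportationDemandForecastingBackup/Api/api.py | truncate_context_fast
-- ===== SOURCE A (Python) =====
-- from typing import List, Optional
--
-- def truncate_context_fast(context_docs: List[str], max_chars: int = 32000) -> str:
--     """Fast context truncation using character limits"""
--     context = ""
--     current_chars = 0
--
--     for doc in context_docs:
--         doc_length = len(doc)
--         if current_chars + doc_length > max_chars:
--             # Add partial document if there's significant space
--             remaining_chars = max_chars - current_chars
--             if remaining_chars > 500:  # Only add if meaningful space left
--                 context += doc[:remaining_chars] + "...\n\n"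
--             break
--
--         context += doc + "\n\n"
--         current_chars += doc_length
--
--     return context.strip()
-- ===== SOURCE B (Python) =====
-- from typing import List
-- from itertools import accumulate
--
-- def truncate_context_fast(context_docs: List[str], max_chars: int = 32000) -> str:
--     """Fast context truncation using character limits (cumulative-sum decomposition)."""
--     cums = list(accumulate(len(d) for d in context_docs))
--     i = next((k for k, c in enumerate(cums) if c > max_chars), len(context_docs))
--     body = "".join(d + "\n\n" for d in context_docs[:i])
--     if i < len(context_docs):
--         remaining = max_chars - (cums[i - 1] if i > 0 else 0)
--         if remaining > 500:
--             body += context_docs[i][:remaining] + "...\n\n"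
--     return body.strip()
-- ===== Notes on version B (the rewrite author's own statement) =====
-- stated objective: alternative
-- what changed: Replaces A's stateful accumulate-and-break loop by a pipeline: cumulative length sums (itertools.accumulate), find the first index exceeding the budget, join the fully fitting docs, then conditionally append one partial doc.
import Mathlib
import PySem

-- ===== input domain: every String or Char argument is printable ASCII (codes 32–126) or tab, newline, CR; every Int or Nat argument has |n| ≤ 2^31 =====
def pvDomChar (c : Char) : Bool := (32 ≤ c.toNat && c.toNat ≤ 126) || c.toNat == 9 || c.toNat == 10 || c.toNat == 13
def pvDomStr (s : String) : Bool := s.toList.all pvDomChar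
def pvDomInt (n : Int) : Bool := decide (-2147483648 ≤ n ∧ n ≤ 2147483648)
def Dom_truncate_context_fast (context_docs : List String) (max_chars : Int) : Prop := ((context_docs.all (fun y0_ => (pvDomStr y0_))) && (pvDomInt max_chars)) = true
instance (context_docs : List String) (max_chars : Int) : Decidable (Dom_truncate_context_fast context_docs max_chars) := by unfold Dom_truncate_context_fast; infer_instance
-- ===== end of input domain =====

-- B replaces A's running-total loop by a cumulative-sums + first-overflow-index decomposition (alternative decomposition, same cost); equivalence proved on all inputs.


-- ===== PORT A =====
-- A's for-loop with break: structural recursion over the docs carrying (context, current_chars).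
def truncAuxA (max_chars : Int) : List String → String → Int → String
  | [], context, _ => context
  | doc :: rest, context, current_chars =>
    let doc_length : Int := PySem.Str.len doc
    if current_chars + doc_length > max_chars then
      let remaining_chars := max_chars - current_chars
      if remaining_chars > 500 then
        context ++ PySem.Str.slice doc none (some remaining_chars) ++ "...\n\n"
      else context
    else
      truncAuxA max_chars rest (context ++ doc ++ "\n\n") (current_chars + doc_length)

def truncate_context_fast (context_docs : List String) (max_chars : Int) : String :=
  PySem.Str.strip (truncAuxA max_chars context_docs "" 0)

-- ===== PORT B =====
-- itertools.accumulate on the lengths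
def accumB : List Int → Int → List Int
  | [], _ => []
  | x :: t, acc => (acc + x) :: accumB t (acc + x)

def truncate_context_fast_alt (context_docs : List String) (max_chars : Int) : String :=
  let cums := accumB (context_docs.map (fun d => (PySem.Str.len d : Int))) 0
  let i : Nat := (cums.findIdx? (fun c => c > max_chars)).getD context_docs.length
  let body := String.join ((context_docs.take i).map (fun d => d ++ "\n\n"))
  let body :=
    if i < context_docs.length then
      let remaining := max_chars - (if 0 < i then cums[i-1]! else 0)
      if remaining > 500 then
        body ++ PySem.Str.slice (context_docs[i]!) none (some remaining) ++ "...\n\n"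
      else body
    else body
  PySem.Str.strip body

-- ===== PRECONDITION & SPEC =====
def Spec_truncate_context_fast (context_docs : List String) (max_chars : Int) (out : String) : Prop := out = truncate_context_fast_alt context_docs max_chars
instance (context_docs : List String) (max_chars : Int) (out : String) : Decidable (Spec_truncate_context_fast context_docs max_chars out) := by unfold Spec_truncate_context_fast; infer_instance

-- ===== CLAIM (what is proved, stated in full; the proofs are below) =====
def Claim_equal_truncate_context_fast : Prop := ∀ (context_docs : List String) (max_chars : Int), Dom_truncate_context_fast context_docs max_chars → Spec_truncate_context_fast context_docs max_chars (truncate_context_fast context_docs max_chars)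

-- ===== LEMMAS AND PROOFS =====

-- B's body, generalized over the running offset `cur` (B itself is this at cur = 0).
def auxB (max_chars : Int) (docs : List String) (cur : Int) : String :=
  let cums := accumB (docs.map (fun d => (PySem.Str.len d : Int))) cur
  let i : Nat := (cums.findIdx? (fun c => c > max_chars)).getD docs.length
  let body := String.join ((docs.take i).map (fun d => d ++ "\n\n"))
  if i < docs.length then
    let remaining := max_chars - (if 0 < i then cums[i-1]! else cur)
    if remaining > 500 then
      body ++ PySem.Str.slice (docs[i]!) none (some remaining) ++ "...\n\n"
    else body
  else body

theorem alt_eq_auxB (docs : List String) (mx : Int) :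
    truncate_context_fast_alt docs mx = PySem.Str.strip (auxB mx docs 0) := rfl

theorem strFoldl_toList (l : List String) :
    ∀ (s : String), (l.foldl (fun r t => r ++ t) s).toList = s.toList ++ (l.map String.toList).flatten := by
  induction l with
  | nil => simp
  | cons x xs ih => intro s; simp [List.foldl_cons, ih]

theorem accumB_length (xs : List Int) : ∀ (cur : Int), (accumB xs cur).length = xs.length := by
  induction xs with
  | nil => intro cur; simp [accumB]
  | cons x t ih => intro cur; simp [accumB, ih]

theorem auxB_nil (mx cur : Int) : (auxB mx [] cur).toList = [] := by
  simp [auxB, String.join]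

theorem auxB_gt (mx cur : Int) (d : String) (rest : List String)
    (h : cur + (PySem.Str.len d : Int) > mx) :
    (auxB mx (d :: rest) cur).toList =
      if mx - cur > 500 then
        (PySem.Str.slice d none (some (mx - cur))).toList ++ "...\n\n".toList
      else [] := by
  simp only [auxB, List.map_cons, accumB, List.findIdx?_cons, decide_eq_true_eq]
  rw [if_pos h]
  simp only [Option.getD_some, List.take_zero, List.map_nil]
  rw [if_pos (by simp : 0 < (d :: rest).length)]
  rw [if_neg (by omega : ¬ (0 : Nat) < 0)]
  split <;> simp [String.join]

theorem auxB_le (mx cur : Int) (d : String) (rest : List String)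
    (h : ¬ (cur + (PySem.Str.len d : Int) > mx)) :
    (auxB mx (d :: rest) cur).toList =
      d.toList ++ "\n\n".toList ++ (auxB mx rest (cur + (PySem.Str.len d : Int))).toList := by
  simp only [auxB, List.map_cons, accumB, List.findIdx?_cons, decide_eq_true_eq]
  rw [if_neg h]
  cases hfi : (accumB (rest.map (fun d => (PySem.Str.len d : Int))) (cur + (PySem.Str.len d : Int))).findIdx? (fun c => decide (c > mx)) with
  | none =>
      simp only [Option.map_none, Option.getD_none, List.length_cons]
      rw [if_neg (by omega : ¬ (rest.length + 1 < rest.length + 1)),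
          if_neg (by omega : ¬ (rest.length < rest.length))]
      rw [List.take_of_length_le (by simp), List.take_of_length_le (by omega)]
      simp [String.join, strFoldl_toList]
  | some j =>
      have hj : j < rest.length := by
        have h1 := List.findIdx?_eq_some_iff_findIdx_eq.mp hfi
        have h2 : (accumB (rest.map (fun d => (PySem.Str.len d : Int))) (cur + (PySem.Str.len d : Int))).length = rest.length := by
          rw [accumB_length, List.length_map]
        omega
      simp only [Option.map_some, Option.getD_some, List.length_cons]
      rw [if_pos (by omega : j + 1 < rest.length + 1), if_pos hj]
      rw [if_pos (by omega : 0 < j + 1)]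
      have hprev : ((cur + (PySem.Str.len d : Int)) :: accumB (rest.map (fun d => (PySem.Str.len d : Int))) (cur + (PySem.Str.len d : Int)))[j + 1 - 1]! =
          (if 0 < j then (accumB (rest.map (fun d => (PySem.Str.len d : Int))) (cur + (PySem.Str.len d : Int)))[j-1]! else cur + (PySem.Str.len d : Int)) := by
        cases j with
        | zero => simp
        | succ k => simp
      rw [hprev]
      rw [show (d :: rest).take (j + 1) = d :: rest.take j from by simp]
      rw [show (d :: rest)[j + 1]! = rest[j]! from by simp]
      split <;> split <;> simp_all [String.join, strFoldl_toList]

theorem truncAuxA_eq (mx : Int) (docs : List String) :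
    ∀ (ctx : String) (cur : Int),
      (truncAuxA mx docs ctx cur).toList = ctx.toList ++ (auxB mx docs cur).toList := by
  induction docs with
  | nil => intro ctx cur; simp [truncAuxA, auxB_nil]
  | cons d rest ih =>
      intro ctx cur
      by_cases h : cur + (PySem.Str.len d : Int) > mx
      · rw [show truncAuxA mx (d :: rest) ctx cur =
              (if mx - cur > 500 then
                ctx ++ PySem.Str.slice d none (some (mx - cur)) ++ "...\n\n"
              else ctx) from by
            simp only [truncAuxA]
            rw [if_pos h]]
        rw [auxB_gt mx cur d rest h]
        split <;> simp
      · rw [show truncAuxA mx (d :: rest) ctx cur =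
              truncAuxA mx rest (ctx ++ d ++ "\n\n") (cur + (PySem.Str.len d : Int)) from by
            simp only [truncAuxA]
            rw [if_neg h]]
        rw [ih, auxB_le mx cur d rest h]
        simp

-- ===== VERDICT (by name: the statement is the Claim_ definition above) =====
theorem truncate_context_fast_spec : Claim_equal_truncate_context_fast := by
  intro docs mx _
  unfold Spec_truncate_context_fast truncate_context_fast
  rw [alt_eq_auxB]
  congr 1
  apply String.toList_inj.mp
  simpa using truncAuxA_eq mx docs "" 0
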